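-- pv_equiv track=rewrite | github.com/willkeepgoing/SPos | sitting_pose_recognition/division.py | dfs_top
-- ===== SOURCE A (Python) =====
-- def dfs_top(b, visited, i, j, contour):
--     m, n = len(b), len(b[0])
--     if visited[i][j] or b[i][j] == 0:
--         return False, contour
--     contour.append((i, j))
--     visited[i][j] = 1
--
--     if len(contour) > 0 and (i == 0 or j == 0 or i == m-1 or j == n-1):
--         return True, contour
--
--     # The depth first search order is: bottom, right, top, left
--     flag, contour = dfs_top(b, visited, i + 1, j, contour)  # 下
--     if flag:
--         return flag, contour
--     flag, contour = dfs_top(b, visited, i, j + 1, contour)  # 右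
--     if flag:
--         return flag, contour
--     flag, contour = dfs_top(b, visited, i - 1, j, contour)  # 上
--     if flag:
--         return flag, contour
--     flag, contour = dfs_top(b, visited, i, j - 1, contour)  # 左
--     return flag, contour
-- ===== SOURCE B (Python) =====
-- def dfs_top(b, visited, i, j, contour):
--     # Iterative DFS with an explicit stack (neighbors pushed in reverse
--     # priority order so that down/right/up/left is explored first).
--     # Like A, mutates visited and contour in place; equivalence is about
--     # the return value.
--     m, n = len(b), len(b[0])
--     stack = [(i, j)]
--     while stack:
--         x, y = stack.pop()
--         if visited[x][y] or b[x][y] == 0: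
--             continue
--         contour.append((x, y))
--         visited[x][y] = 1
--         if x == 0 or y == 0 or x == m - 1 or y == n - 1:
--             return True, contour
--         stack.extend([(x, y - 1), (x - 1, y), (x, y + 1), (x + 1, y)])
--     return False, contour
-- ===== Notes on version B (the rewrite author's own statement) =====
-- stated objective: alternative
-- what changed: Replaces A's four-way recursive DFS by an iterative DFS over an explicit stack: neighbours are pushed in reverse priority order (left, up, right, down) and the visited/zero guard is applied when a cell is popped, preserving A's exact visit order and early boundary return.
-- outside the precondition, e.g. on dfs_top([[1]], [[0]], 1, 0, []): A raises IndexError, B raises IndexError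
import Mathlib
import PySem

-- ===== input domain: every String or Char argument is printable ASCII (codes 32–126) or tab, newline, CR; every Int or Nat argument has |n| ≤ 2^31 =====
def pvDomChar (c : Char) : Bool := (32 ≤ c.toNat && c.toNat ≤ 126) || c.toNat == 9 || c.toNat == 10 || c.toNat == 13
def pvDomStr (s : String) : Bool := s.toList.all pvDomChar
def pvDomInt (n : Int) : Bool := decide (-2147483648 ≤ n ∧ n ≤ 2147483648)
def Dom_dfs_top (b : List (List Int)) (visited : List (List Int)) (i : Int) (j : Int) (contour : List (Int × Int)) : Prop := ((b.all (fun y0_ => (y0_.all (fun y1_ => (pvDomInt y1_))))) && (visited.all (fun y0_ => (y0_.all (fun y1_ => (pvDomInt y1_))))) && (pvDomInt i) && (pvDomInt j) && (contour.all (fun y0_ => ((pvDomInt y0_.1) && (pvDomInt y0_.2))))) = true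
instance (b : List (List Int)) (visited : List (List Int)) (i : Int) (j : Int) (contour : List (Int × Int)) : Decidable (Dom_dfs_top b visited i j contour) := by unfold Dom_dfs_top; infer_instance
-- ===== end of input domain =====

-- B replaces A's four-way recursive DFS by an iterative DFS over an explicit stack
-- (objective: alternative decomposition, same visit order); both Pythons mutate
-- `visited` and `contour` in place in the same way, the claim is about the return value.

-- shared indexing helpers (both Pythons use the same `x[i][j]` reads and `x[i][j] = 1` writes)
-- `visited[i][j]` / `b[i][j]` with Python index semantics; `none` = IndexError
def pvAt2 (v : List (List Int)) (i j : Int) : Option Int :=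
  (PySem.List.pyGet? v i).bind (fun row => PySem.List.pyGet? row j)

-- `visited[i][j] = 1` with Python index semantics (identity where Python raises; such inputs are outside Pre_)
def pvSet2 (v : List (List Int)) (i j : Int) : List (List Int) :=
  (((PySem.List.pyIdx? v.length i).bind (fun ii =>
    (PySem.List.pyIdx? (v.getD ii []).length j).map (fun jj =>
      v.set ii ((v.getD ii []).set jj 1)))).getD v)

-- number of `visited` entries equal to 0: bounds the recursion depth of both ports
def pvZeros : List (List Int) → Nat
  | [] => 0
  | r :: t => r.countP (fun x => x == 0) + pvZeros t

-- ===== PORT A =====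
-- A's recursion, with `visited` threaded through (Python mutates it in place) and a
-- fuel counter making the recursion structural; every marking shrinks `pvZeros`, so
-- fuel `pvZeros visited + 1` (supplied by `dfs_top`) never runs out. Where Python
-- would raise IndexError the guard falls into the early `False` return; all such
-- inputs are outside Pre_dfs_top.
def dfsAGo (fuel : Nat) (b : List (List Int)) (visited : List (List Int)) (i j : Int)
    (contour : List (Int × Int)) : Bool × List (List Int) × List (Int × Int) :=
  match fuel with
  | 0 => (false, visited, contour)
  | fuel + 1 =>
    if pvAt2 visited i j = some 0 ∧ (pvAt2 b i j).getD 0 ≠ 0 then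
      let contour1 := contour ++ [(i, j)]
      let v1 := pvSet2 visited i j
      if 0 < contour1.length ∧ (i = 0 ∨ j = 0 ∨ i = (b.length : Int) - 1 ∨
          j = ((PySem.List.pyGetD b 0 []).length : Int) - 1) then
        (true, v1, contour1)
      else
        let r1 := dfsAGo fuel b v1 (i + 1) j contour1
        if r1.1 then r1 else
        let r2 := dfsAGo fuel b r1.2.1 i (j + 1) r1.2.2
        if r2.1 then r2 else
        let r3 := dfsAGo fuel b r2.2.1 (i - 1) j r2.2.2
        if r3.1 then r3 else
        dfsAGo fuel b r3.2.1 i (j - 1) r3.2.2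
    else
      (false, visited, contour)

def dfs_top (b : List (List Int)) (visited : List (List Int)) (i : Int) (j : Int)
    (contour : List (Int × Int)) : Bool × (List (Int × Int)) :=
  ((dfsAGo (pvZeros visited + 1) b visited i j contour).1,
   (dfsAGo (pvZeros visited + 1) b visited i j contour).2.2)

-- ===== PORT B =====
-- Source B's while-loop over an explicit stack (head of the list = top of the stack),
-- with a fuel counter making the loop structural; each iteration pops one cell and
-- pushes at most four after shrinking `pvZeros`, so fuel `4*pvZeros visited + 3`
-- (supplied by `dfs_top_alt` for the singleton start stack) never runs out. The
-- guard is applied on pop; neighbours are pushed left, up, right, down so that down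
-- is popped first. `none` lookups (Python IndexError) fall into the skip branch;
-- all such inputs are outside Pre_dfs_top.
def dfsBGo (fuel : Nat) (b : List (List Int)) (m n : Int) (visited : List (List Int))
    (stack : List (Int × Int)) (contour : List (Int × Int)) : Bool × List (Int × Int) :=
  match fuel with
  | 0 => (false, contour)
  | fuel + 1 =>
    match stack with
    | [] => (false, contour)
    | (x, y) :: rest =>
      if pvAt2 visited x y = some 0 ∧ (pvAt2 b x y).getD 0 ≠ 0 then
        if x = 0 ∨ y = 0 ∨ x = m - 1 ∨ y = n - 1 then
          (true, contour ++ [(x, y)])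
        else
          dfsBGo fuel b m n (pvSet2 visited x y)
            ((x + 1, y) :: (x, y + 1) :: (x - 1, y) :: (x, y - 1) :: rest) (contour ++ [(x, y)])
      else
        dfsBGo fuel b m n visited rest contour

def dfs_top_alt (b : List (List Int)) (visited : List (List Int)) (i : Int) (j : Int)
    (contour : List (Int × Int)) : Bool × (List (Int × Int)) :=
  dfsBGo (4 * pvZeros visited + 3) b (b.length : Int)
    ((PySem.List.pyGetD b 0 []).length : Int) visited [(i, j)] contour

-- ===== PRECONDITION & SPEC =====
-- Pre_ admits exactly the two ways Python A returns without raising: (1) the guard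
-- returns False at once (b nonempty so len(b[0]) succeeds, visited[i][j] readable —
-- wraparound included — and truthy, or else b[i][j] readable and 0); (2) a real DFS
-- from an in-range start cell on a nonempty rectangular grid with visited of the same
-- shape. Other starts (negative wraparound into a DFS, ragged grids) are excluded:
-- whether Python's walk raises there depends on the walk itself and is not
-- expressible in closed form (A and B behave alike there whenever A returns).
def Pre_dfs_top (b : List (List Int)) (visited : List (List Int)) (i : Int) (j : Int)
    (contour : List (Int × Int)) : Prop :=
  b ≠ [] ∧
  (((pvAt2 visited i j).isSome ∧
     ((pvAt2 visited i j).getD 0 ≠ 0 ∨ pvAt2 b i j = some 0)) ∨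
   ((∀ r ∈ b, r.length = b.headI.length) ∧
    visited.length = b.length ∧ (∀ r ∈ visited, r.length = b.headI.length) ∧
    0 ≤ i ∧ i < (b.length : Int) ∧ 0 ≤ j ∧ j < (b.headI.length : Int)))
instance (b : List (List Int)) (visited : List (List Int)) (i : Int) (j : Int) (contour : List (Int × Int)) : Decidable (Pre_dfs_top b visited i j contour) := by unfold Pre_dfs_top; infer_instance

def pvWitness_dfs_top : List (List Int) × List (List Int) × Int × Int × (List (Int × Int)) :=
  ([[0, 0, 0], [0, 1, 0], [0, 0, 0]], [[0, 0, 0], [0, 0, 0], [0, 0, 0]], 1, 1, [])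

def Spec_dfs_top (b : List (List Int)) (visited : List (List Int)) (i : Int) (j : Int) (contour : List (Int × Int)) (out : Bool × (List (Int × Int))) : Prop := out = dfs_top_alt b visited i j contour
instance (b : List (List Int)) (visited : List (List Int)) (i : Int) (j : Int) (contour : List (Int × Int)) (out : Bool × (List (Int × Int))) : Decidable (Spec_dfs_top b visited i j contour out) := by unfold Spec_dfs_top; infer_instance

-- ===== CLAIM (what is proved, stated in full; the proofs are below) =====
def Claim_equal_dfs_top : Prop := ∀ (b : List (List Int)) (visited : List (List Int)) (i : Int) (j : Int) (contour : List (Int × Int)), Dom_dfs_top b visited i j contour → Pre_dfs_top b visited i j contour → Spec_dfs_top b visited i j contour (dfs_top b visited i j contour)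

-- ===== LEMMAS AND PROOFS =====

lemma pvCountP_set_lt (row : List Int) (jj : Nat) (h : row[jj]? = some 0) :
    (row.set jj 1).countP (fun x => x == 0) < row.countP (fun x => x == 0) := by
  induction row generalizing jj with
  | nil => simp at h
  | cons a t ih =>
    cases jj with
    | zero =>
      simp_all
    | succ k =>
      simp only [List.getElem?_cons_succ] at h
      simp only [List.set_cons_succ, List.countP_cons]
      have := ih k h
      omega

lemma pvZeros_set_lt (v : List (List Int)) (ii : Nat) (row : List Int) (jj : Nat)
    (hv : v[ii]? = some row) (hr : row[jj]? = some 0) :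
    pvZeros (v.set ii (row.set jj 1)) < pvZeros v := by
  induction v generalizing ii with
  | nil => simp at hv
  | cons r t ih =>
    cases ii with
    | zero =>
      simp only [List.getElem?_cons_zero, Option.some.injEq] at hv
      subst hv
      simp only [List.set_cons_zero, pvZeros]
      have := pvCountP_set_lt _ jj hr
      omega
    | succ k =>
      simp only [List.getElem?_cons_succ] at hv
      simp only [List.set_cons_succ, pvZeros]
      have := ih k hv
      omega

-- marking a cell whose `visited` entry reads 0 strictly decreases the measure
lemma pvSet2_lt (v : List (List Int)) (i j : Int) (h : pvAt2 v i j = some 0) :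
    pvZeros (pvSet2 v i j) < pvZeros v := by
  unfold pvAt2 at h
  rw [Option.bind_eq_some_iff] at h
  obtain ⟨row, h1, h2⟩ := h
  unfold PySem.List.pyGet? at h1 h2
  rw [Option.bind_eq_some_iff] at h1 h2
  obtain ⟨ii, hii, hvi⟩ := h1
  obtain ⟨jj, hjj, hrj⟩ := h2
  unfold pvSet2
  have hrow : v.getD ii [] = row := by
    simp [List.getD_eq_getElem?_getD, hvi]
  rw [hii]
  simp only [Option.bind_some, hrow, hjj, Option.map_some, Option.getD_some]
  exact pvZeros_set_lt v ii row jj hvi hrj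

-- port A's recursion never increases the number of unvisited cells
lemma dfsAGo_zeros_le (fuel : Nat) : ∀ (b visited : List (List Int)) (i j : Int)
    (contour : List (Int × Int)),
    pvZeros (dfsAGo fuel b visited i j contour).2.1 ≤ pvZeros visited := by
  induction fuel with
  | zero => intro b visited i j contour; simp [dfsAGo]
  | succ fuel ih =>
    intro b visited i j contour
    rw [dfsAGo]
    by_cases hg : pvAt2 visited i j = some 0 ∧ (pvAt2 b i j).getD 0 ≠ 0
    · have h1 : pvZeros (pvSet2 visited i j) ≤ pvZeros visited := (pvSet2_lt visited i j hg.1).le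
      simp only [if_pos hg]
      by_cases hb : 0 < (contour ++ [(i, j)]).length ∧ (i = 0 ∨ j = 0 ∨ i = (b.length : Int) - 1 ∨
          j = ((PySem.List.pyGetD b 0 []).length : Int) - 1)
      · simp only [if_pos hb]
        exact h1

      · simp only [if_neg hb]
        by_cases f1 : (dfsAGo fuel b (pvSet2 visited i j) (i + 1) j (contour ++ [(i, j)])).1
        · simp only [if_pos f1]
          exact le_trans (ih b (pvSet2 visited i j) (i + 1) j (contour ++ [(i, j)])) h1
        · simp only [if_neg f1]
          have q1 := le_trans (ih b (pvSet2 visited i j) (i + 1) j (contour ++ [(i, j)])) h1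
          by_cases f2 : (dfsAGo fuel b (dfsAGo fuel b (pvSet2 visited i j) (i + 1) j (contour ++ [(i, j)])).2.1 i (j + 1) (dfsAGo fuel b (pvSet2 visited i j) (i + 1) j (contour ++ [(i, j)])).2.2).1
          · simp only [if_pos f2]
            exact le_trans (ih b (dfsAGo fuel b (pvSet2 visited i j) (i + 1) j (contour ++ [(i, j)])).2.1 i (j + 1) (dfsAGo fuel b (pvSet2 visited i j) (i + 1) j (contour ++ [(i, j)])).2.2) q1
          · simp only [if_neg f2]
            have q2 := le_trans (ih b (dfsAGo fuel b (pvSet2 visited i j) (i + 1) j (contour ++ [(i, j)])).2.1 i (j + 1) (dfsAGo fuel b (pvSet2 visited i j) (i + 1) j (contour ++ [(i, j)])).2.2) q1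
            by_cases f3 : (dfsAGo fuel b (dfsAGo fuel b (dfsAGo fuel b (pvSet2 visited i j) (i + 1) j (contour ++ [(i, j)])).2.1 i (j + 1) (dfsAGo fuel b (pvSet2 visited i j) (i + 1) j (contour ++ [(i, j)])).2.2).2.1 (i - 1) j (dfsAGo fuel b (dfsAGo fuel b (pvSet2 visited i j) (i + 1) j (contour ++ [(i, j)])).2.1 i (j + 1) (dfsAGo fuel b (pvSet2 visited i j) (i + 1) j (contour ++ [(i, j)])).2.2).2.2).1
            · simp only [if_pos f3]
              exact le_trans (ih b (dfsAGo fuel b (dfsAGo fuel b (pvSet2 visited i j) (i + 1) j (contour ++ [(i, j)])).2.1 i (j + 1) (dfsAGo fuel b (pvSet2 visited i j) (i + 1) j (contour ++ [(i, j)])).2.2).2.1 (i - 1) j (dfsAGo fuel b (dfsAGo fuel b (pvSet2 visited i j) (i + 1) j (contour ++ [(i, j)])).2.1 i (j + 1) (dfsAGo fuel b (pvSet2 visited i j) (i + 1) j (contour ++ [(i, j)])).2.2).2.2) q2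
            · simp only [if_neg f3]
              have q3 := le_trans (ih b (dfsAGo fuel b (dfsAGo fuel b (pvSet2 visited i j) (i + 1) j (contour ++ [(i, j)])).2.1 i (j + 1) (dfsAGo fuel b (pvSet2 visited i j) (i + 1) j (contour ++ [(i, j)])).2.2).2.1 (i - 1) j (dfsAGo fuel b (dfsAGo fuel b (pvSet2 visited i j) (i + 1) j (contour ++ [(i, j)])).2.1 i (j + 1) (dfsAGo fuel b (pvSet2 visited i j) (i + 1) j (contour ++ [(i, j)])).2.2).2.2) q2
              exact le_trans (ih b (dfsAGo fuel b (dfsAGo fuel b (dfsAGo fuel b (pvSet2 visited i j) (i + 1) j (contour ++ [(i, j)])).2.1 i (j + 1) (dfsAGo fuel b (pvSet2 visited i j) (i + 1) j (contour ++ [(i, j)])).2.2).2.1 (i - 1) j (dfsAGo fuel b (dfsAGo fuel b (pvSet2 visited i j) (i + 1) j (contour ++ [(i, j)])).2.1 i (j + 1) (dfsAGo fuel b (pvSet2 visited i j) (i + 1) j (contour ++ [(i, j)])).2.2).2.2).2.1 i (j - 1) (dfsAGo fuel b (dfsAGo fuel b (dfsAGo fuel b (pvSet2 visited i j) (i + 1)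 j (contour ++ [(i, j)])).2.1 i (j + 1) (dfsAGo fuel b (pvSet2 visited i j) (i + 1) j (contour ++ [(i, j)])).2.2).2.1 (i - 1) j (dfsAGo fuel b (dfsAGo fuel b (pvSet2 visited i j) (i + 1) j (contour ++ [(i, j)])).2.1 i (j + 1) (dfsAGo fuel b (pvSet2 visited i j) (i + 1) j (contour ++ [(i, j)])).2.2).2.2).2.2) q3
    · simp only [if_neg hg]
      exact le_refl _

-- port B's loop gives the same answer for any two sufficient fuels
lemma dfsBGo_fuel (N : Nat) : ∀ (b : List (List Int)) (m n : Int)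
    (visited : List (List Int)) (stack contour : List (Int × Int)) (f f' : Nat),
    4 * pvZeros visited + stack.length ≤ N →
    4 * pvZeros visited + stack.length < f → 4 * pvZeros visited + stack.length < f' →
    dfsBGo f b m n visited stack contour = dfsBGo f' b m n visited stack contour := by
  induction N with
  | zero =>
    intro b m n visited stack contour f f' hN hf hf'
    cases stack with
    | nil =>
      cases f with
      | zero => omega
      | succ f =>
        cases f' with
        | zero => omega
        | succ f' => rfl
    | cons hd rest => simp only [List.length_cons] at hN; omega
  | succ N ih =>
    intro b m n visited stack contour f f' hN hf hf'
    cases stack with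
    | nil =>
      cases f with
      | zero => omega
      | succ f =>
        cases f' with
        | zero => omega
        | succ f' => rfl
    | cons hd rest =>
      obtain ⟨x, y⟩ := hd
      simp only [List.length_cons] at hN hf hf'
      cases f with
      | zero => omega
      | succ f =>
        cases f' with
        | zero => omega
        | succ f' =>
          rw [dfsBGo, dfsBGo]
          by_cases hg : pvAt2 visited x y = some 0 ∧ (pvAt2 b x y).getD 0 ≠ 0
          · have hlt := pvSet2_lt visited x y hg.1
            by_cases hb : x = 0 ∨ y = 0 ∨ x = m - 1 ∨ y = n - 1
            · simp only [if_pos hg, if_pos hb]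
            · simp only [if_pos hg, if_neg hb]
              apply ih
              · simp only [List.length_cons]; omega
              · simp only [List.length_cons]; omega
              · simp only [List.length_cons]; omega
          · simp only [if_neg hg]
            apply ih <;> omega

-- the stack loop processes its top exactly as one recursive call of A does
lemma dfsB_cons (N : Nat) : ∀ (b : List (List Int)) (visited : List (List Int))
    (x y : Int) (stack contour : List (Int × Int)) (fA fB : Nat),
    pvZeros visited ≤ N → pvZeros visited < fA →
    4 * pvZeros visited + stack.length + 1 < fB →
    dfsBGo fB b (b.length : Int) ((PySem.List.pyGetD b 0 []).length : Int) visited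
        ((x, y) :: stack) contour =
      (if (dfsAGo fA b visited x y contour).1 then
        (true, (dfsAGo fA b visited x y contour).2.2)
       else dfsBGo fB b (b.length : Int) ((PySem.List.pyGetD b 0 []).length : Int)
              (dfsAGo fA b visited x y contour).2.1 stack
              (dfsAGo fA b visited x y contour).2.2) := by
  induction N with
  | zero =>
    intro b visited x y stack contour fA fB hN hA hB
    by_cases hg : pvAt2 visited x y = some 0 ∧ (pvAt2 b x y).getD 0 ≠ 0
    · have hlt := pvSet2_lt visited x y hg.1
      omega
    · cases fA with
      | zero => omega
      | succ fA =>
        cases fB with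
        | zero => omega
        | succ fB =>
          rw [dfsBGo, dfsAGo]
          simp only [if_neg hg]
          exact dfsBGo_fuel (4 * pvZeros visited + stack.length) b _ _ visited stack contour
            fB (fB + 1) (le_refl _) (by omega) (by omega)
  | succ N ih =>
    intro b visited x y stack contour fA fB hN hA hB
    cases fA with
    | zero => omega
    | succ fA =>
      cases fB with
      | zero => omega
      | succ fB =>
        rw [dfsBGo, dfsAGo]
        by_cases hg : pvAt2 visited x y = some 0 ∧ (pvAt2 b x y).getD 0 ≠ 0
        · have hlt := pvSet2_lt visited x y hg.1
          by_cases hb : x = 0 ∨ y = 0 ∨ x = (b.length : Int) - 1 ∨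
              y = ((PySem.List.pyGetD b 0 []).length : Int) - 1
          · have hb' : 0 < (contour ++ [(x, y)]).length ∧ (x = 0 ∨ y = 0 ∨
                x = (b.length : Int) - 1 ∨ y = ((PySem.List.pyGetD b 0 []).length : Int) - 1) :=
              ⟨by simp, hb⟩
            simp only [if_pos hg, if_pos hb, if_pos hb', if_true]
          · have hb' : ¬ (0 < (contour ++ [(x, y)]).length ∧ (x = 0 ∨ y = 0 ∨
                x = (b.length : Int) - 1 ∨ y = ((PySem.List.pyGetD b 0 []).length : Int) - 1)) :=
              fun h => hb h.2
            simp only [if_pos hg, if_neg hb, if_neg hb']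
            -- four chained applications of the induction hypothesis
            rw [ih b (pvSet2 visited x y) (x + 1) y _ _ fA fB (by omega) (by omega)
              (by simp only [List.length_cons]; omega)]
            by_cases f1 : (dfsAGo fA b (pvSet2 visited x y) (x + 1) y (contour ++ [(x, y)])).1
            · simp only [if_pos f1]
            · simp only [if_neg f1]
              have m1 := dfsAGo_zeros_le fA b (pvSet2 visited x y) (x + 1) y (contour ++ [(x, y)])
              rw [ih b (dfsAGo fA b (pvSet2 visited x y) (x + 1) y (contour ++ [(x, y)])).2.1 x (y + 1) _ _ fA fB (by omega) (by omega)
                (by simp only [List.length_cons]; omega)]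
              by_cases f2 : (dfsAGo fA b (dfsAGo fA b (pvSet2 visited x y) (x + 1) y (contour ++ [(x, y)])).2.1 x (y + 1) (dfsAGo fA b (pvSet2 visited x y) (x + 1) y (contour ++ [(x, y)])).2.2).1
              · simp only [if_pos f2]
              · simp only [if_neg f2]
                have m2 := dfsAGo_zeros_le fA b (dfsAGo fA b (pvSet2 visited x y) (x + 1) y (contour ++ [(x, y)])).2.1 x (y + 1) (dfsAGo fA b (pvSet2 visited x y) (x + 1) y (contour ++ [(x, y)])).2.2
                rw [ih b (dfsAGo fA b (dfsAGo fA b (pvSet2 visited x y) (x + 1) y (contour ++ [(x, y)])).2.1 x (y + 1) (dfsAGo fA b (pvSet2 visited x y) (x + 1) y (contour ++ [(x, y)])).2.2).2.1 (x - 1) y _ _ fA fB (by omega) (by omega)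
                  (by simp only [List.length_cons]; omega)]
                by_cases f3 : (dfsAGo fA b (dfsAGo fA b (dfsAGo fA b (pvSet2 visited x y) (x + 1) y (contour ++ [(x, y)])).2.1 x (y + 1) (dfsAGo fA b (pvSet2 visited x y) (x + 1) y (contour ++ [(x, y)])).2.2).2.1 (x - 1) y (dfsAGo fA b (dfsAGo fA b (pvSet2 visited x y) (x + 1) y (contour ++ [(x, y)])).2.1 x (y + 1) (dfsAGo fA b (pvSet2 visited x y) (x + 1) y (contour ++ [(x, y)])).2.2).2.2).1
                · simp only [if_pos f3]
                · simp only [if_neg f3]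
                  have m3 := dfsAGo_zeros_le fA b (dfsAGo fA b (dfsAGo fA b (pvSet2 visited x y) (x + 1) y (contour ++ [(x, y)])).2.1 x (y + 1) (dfsAGo fA b (pvSet2 visited x y) (x + 1) y (contour ++ [(x, y)])).2.2).2.1 (x - 1) y (dfsAGo fA b (dfsAGo fA b (pvSet2 visited x y) (x + 1) y (contour ++ [(x, y)])).2.1 x (y + 1) (dfsAGo fA b (pvSet2 visited x y) (x + 1) y (contour ++ [(x, y)])).2.2).2.2
                  rw [ih b (dfsAGo fA b (dfsAGo fA b (dfsAGo fA b (pvSet2 visited x y) (x + 1) y (contour ++ [(x, y)])).2.1 x (y + 1) (dfsAGo fA b (pvSet2 visited x y) (x + 1) y (contour ++ [(x, y)])).2.2).2.1 (x - 1) y (dfsAGo fA b (dfsAGo fA b (pvSet2 visited x y) (x + 1) y (contour ++ [(x, y)])).2.1 x (y + 1) (dfsAGo fA b (pvSet2 visited x y) (x + 1) y (contour ++ [(x, y)])).2.2).2.2).2.1 x (y - 1) _ _ fA fB (by omega) (by omega)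
                    (by omega)]
                  by_cases f4 : (dfsAGo fA b (dfsAGo fA b (dfsAGo fA b (dfsAGo fA b (pvSet2 visited x y) (x + 1) y (contour ++ [(x, y)])).2.1 x (y + 1) (dfsAGo fA b (pvSet2 visited x y) (x + 1) y (contour ++ [(x, y)])).2.2).2.1 (x - 1) y (dfsAGo fA b (dfsAGo fA b (pvSet2 visited x y) (x + 1) y (contour ++ [(x, y)])).2.1 x (y + 1) (dfsAGo fA b (pvSet2 visited x y) (x + 1) y (contour ++ [(x, y)])).2.2).2.2).2.1 x (y - 1) (dfsAGo fA b (dfsAGo fA b (dfsAGo fA b (pvSet2 visited x y) (x + 1) y (contour ++ [(x, y)])).2.1 x (y + 1) (dfsAGo fA b (pvSet2 visited x y) (x + 1) y (contour ++ [(x, y)])).2.2).2.1 (x - 1) y (dfsAGo fA b (dfsAGo fA b (pvSet2 visited x y) (x + 1) y (contour ++ [(x, y)])).2.1 x (y + 1) (dfsAGo fA b (pvSet2 visited x y) (x + 1) y (contour ++ [(x, y)])).2.2).2.2).2.2).1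
                  · simp only [if_pos f4]
                  · simp only [if_neg f4]
                    have m4 := dfsAGo_zeros_le fA b (dfsAGo fA b (dfsAGo fA b (dfsAGo fA b (pvSet2 visited x y) (x + 1) y (contour ++ [(x, y)])).2.1 x (y + 1) (dfsAGo fA b (pvSet2 visited x y) (x + 1) y (contour ++ [(x, y)])).2.2).2.1 (x - 1) y (dfsAGo fA b (dfsAGo fA b (pvSet2 visited x y) (x + 1) y (contour ++ [(x, y)])).2.1 x (y + 1) (dfsAGo fA b (pvSet2 visited x y) (x + 1) y (contour ++ [(x, y)])).2.2).2.2).2.1 x (y - 1) (dfsAGo fA b (dfsAGo fA b (dfsAGo fA b (pvSet2 visited x y) (x + 1) y (contour ++ [(x, y)])).2.1 x (y + 1) (dfsAGo fA b (pvSet2 visited x y) (x + 1) y (contour ++ [(x, y)])).2.2).2.1 (x - 1) y (dfsAGo fA b (dfsAGo fA b (pvSet2 visited x y) (x + 1) y (contour ++ [(x, y)])).2.1 x (y + 1) (dfsAGo fA b (pvSet2 visited x y) (x + 1) y (contour ++ [(x, y)])).2.2).2.2).2.2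
                    exact dfsBGo_fuel (4 * pvZeros (dfsAGo fA b (dfsAGo fA b (dfsAGo fA b (dfsAGo fA b (pvSet2 visited x y) (x + 1) y (contour ++ [(x, y)])).2.1 x (y + 1) (dfsAGo fA b (pvSet2 visited x y) (x + 1) y (contour ++ [(x, y)])).2.2).2.1 (x - 1) y (dfsAGo fA b (dfsAGo fA b (pvSet2 visited x y) (x + 1) y (contour ++ [(x, y)])).2.1 x (y + 1) (dfsAGo fA b (pvSet2 visited x y) (x + 1) y (contour ++ [(x, y)])).2.2).2.2).2.1 x (y - 1) (dfsAGo fA b (dfsAGo fA b (dfsAGo fA b (pvSet2 visited x y) (x + 1) y (contour ++ [(x, y)])).2.1 x (y + 1) (dfsAGo fA b (pvSet2 visited x y) (x + 1) y (contour ++ [(x, y)])).2.2).2.1 (x - 1) y (dfsAGo fA b (dfsAGo fA b (pvSet2 visited x y) (x + 1) y (contour ++ [(x, y)])).2.1 x (y + 1) (dfsAGo fA b (pvSet2 visited x y) (x + 1) y (contour ++ [(x, y)])).2.2).2.2).2.2).2.1 + stack.length) b _ _ _ stack _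
                      fB (fB + 1) (le_refl _) (by omega) (by omega)
        · simp only [if_neg hg]
          exact dfsBGo_fuel (4 * pvZeros visited + stack.length) b _ _ visited stack contour
            fB (fB + 1) (le_refl _) (by omega) (by omega)

-- unconditional agreement of the two ports (Pre_ is about faithfulness to Python, not needed here)
lemma dfs_top_eq_alt (b : List (List Int)) (visited : List (List Int)) (i j : Int)
    (contour : List (Int × Int)) :
    dfs_top b visited i j contour = dfs_top_alt b visited i j contour := by
  unfold dfs_top dfs_top_alt
  rw [show 4 * pvZeros visited + 3 = (4 * pvZeros visited + 2) + 1 from rfl]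
  rw [dfsB_cons (pvZeros visited) b visited i j [] contour (pvZeros visited + 1)
    ((4 * pvZeros visited + 2) + 1) (le_refl _) (by omega) (by simp)]
  by_cases hf : (dfsAGo (pvZeros visited + 1) b visited i j contour).1
  · simp only [if_pos hf]
    rw [hf]
  · simp only [if_neg hf]
    rw [dfsBGo]
    rw [Bool.not_eq_true] at hf
    rw [hf]

-- ===== VERDICT (by name: the statement is the Claim_ definition above) =====
theorem dfs_top_spec : Claim_equal_dfs_top := by
  intro b visited i j contour _ _
  unfold Spec_dfs_top
  exact dfs_top_eq_alt b visited i j contour
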